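-- pv_equiv track=rewrite | github.com/danieleschmidt/Neuro-Symbolic-Law-Prover | src/neuro_symbolic_law/parsing/contract_parser.py | _infer_entity_type
-- ===== SOURCE A (Python) =====
-- from typing import List, Dict, Optional, Any
--
-- def _infer_entity_type(party_name: str) -> Optional[str]:
--     """Infer entity type from party name."""
--     if any(suffix in party_name for suffix in ['Inc.', 'Corp.', 'LLC', 'Ltd.', 'Corporation']):
--         return "corporation"
--     elif 'University' in party_name or 'College' in party_name:
--         return "educational"
--     elif 'Government' in party_name or 'State' in party_name:
--         return "government"
--     else:
--         return "individual"
-- ===== SOURCE B (Python) =====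
-- _KEYWORD_PRIORITY = {
--     'Inc.': 0, 'Corp.': 0, 'LLC': 0, 'Ltd.': 0, 'Corporation': 0,
--     'University': 1, 'College': 1,
--     'Government': 2, 'State': 2,
-- }
-- _CATEGORIES = ["corporation", "educational", "government", "individual"]
--
-- def _infer_entity_type(party_name: str):
--     """Infer entity type: take the minimum priority over ALL matching keywords."""
--     best = 3  # priority of the default "individual"
--     for kw, pr in _KEYWORD_PRIORITY.items():
--         if pr < best and kw in party_name:
--             best = pr
--     return _CATEGORIES[best]
-- ===== Notes on version B (the rewrite author's own statement) =====
-- stated objective: alternative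
-- what changed: Replaces A's ordered if/elif first-match branch chain by a flat keyword-to-priority map folded with a min-priority accumulator (every keyword is examined, the smallest priority wins, a table indexed by the minimum gives the category); branch order becomes arithmetic.
import Mathlib
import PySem

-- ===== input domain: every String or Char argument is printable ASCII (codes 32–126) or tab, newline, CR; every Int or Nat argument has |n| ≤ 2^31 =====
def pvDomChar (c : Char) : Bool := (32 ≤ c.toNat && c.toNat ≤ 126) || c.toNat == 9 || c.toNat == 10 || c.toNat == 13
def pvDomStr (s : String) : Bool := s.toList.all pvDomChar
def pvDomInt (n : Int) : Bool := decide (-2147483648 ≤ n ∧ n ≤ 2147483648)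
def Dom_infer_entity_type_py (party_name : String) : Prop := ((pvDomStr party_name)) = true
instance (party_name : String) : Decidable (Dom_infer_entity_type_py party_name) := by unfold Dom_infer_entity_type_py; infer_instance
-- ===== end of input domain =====

-- B replaces A's if/elif first-match chain by a flat keyword→priority map folded with a min-priority accumulator (alternative decomposition, same cost).


-- ===== PORT A =====
def infer_entity_type_py (party_name : String) : Option String :=
  if (["Inc.", "Corp.", "LLC", "Ltd.", "Corporation"].any
        (fun suffix => PySem.Str.isIn suffix party_name)) then
    some "corporation"
  else if PySem.Str.isIn "University" party_name || PySem.Str.isIn "College" party_name then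
    some "educational"
  else if PySem.Str.isIn "Government" party_name || PySem.Str.isIn "State" party_name then
    some "government"
  else
    some "individual"

-- ===== PORT B =====
-- keyword → priority map (insertion order of Source B's dict)
def pvKeywordPriority : List (String × Nat) :=
  [("Inc.", 0), ("Corp.", 0), ("LLC", 0), ("Ltd.", 0), ("Corporation", 0),
   ("University", 1), ("College", 1),
   ("Government", 2), ("State", 2)]

def pvCategories : List String :=
  ["corporation", "educational", "government", "individual"]

def infer_entity_type_py_alt (party_name : String) : Option String :=
  some (pvCategories.getD
    (pvKeywordPriority.foldl
      (fun best kp =>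
        if kp.2 < best && PySem.Str.isIn kp.1 party_name then kp.2 else best)
      3)
    "individual")

-- ===== PRECONDITION & SPEC =====
def Spec_infer_entity_type_py (party_name : String) (out : Option String) : Prop := out = infer_entity_type_py_alt party_name
instance (party_name : String) (out : Option String) : Decidable (Spec_infer_entity_type_py party_name out) := by unfold Spec_infer_entity_type_py; infer_instance

-- ===== CLAIM (what is proved, stated in full; the proofs are below) =====
def Claim_equal_infer_entity_type_py : Prop := ∀ (party_name : String), Dom_infer_entity_type_py party_name → Spec_infer_entity_type_py party_name (infer_entity_type_py party_name)

-- ===== LEMMAS AND PROOFS =====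

-- one accumulator step of B's fold
def pvStep (best pr : Nat) (b : Bool) : Nat := if pr < best && b then pr else best

-- the whole comparison with the nine substring tests abstracted as Bools (512 cases, kernel-evaluated)
theorem pv_key (b1 b2 b3 b4 b5 b6 b7 b8 b9 : Bool) :
    (if (b1 || (b2 || (b3 || (b4 || b5)))) then some "corporation"
     else if b6 || b7 then some "educational"
     else if b8 || b9 then some "government"
     else some "individual")
    = some (pvCategories.getD
        (pvStep (pvStep (pvStep (pvStep (pvStep (pvStep (pvStep (pvStep (pvStep
          3 0 b1) 0 b2) 0 b3) 0 b4) 0 b5) 1 b6) 1 b7) 2 b8) 2 b9)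
        "individual") := by
  cases b1 <;> cases b2 <;> cases b3 <;> cases b4 <;> cases b5 <;>
  cases b6 <;> cases b7 <;> cases b8 <;> cases b9 <;> rfl

-- ===== VERDICT (by name: the statement is the Claim_ definition above) =====
theorem infer_entity_type_py_spec : Claim_equal_infer_entity_type_py := by
  intro p _
  unfold Spec_infer_entity_type_py infer_entity_type_py infer_entity_type_py_alt pvKeywordPriority
  simp only [List.foldl, List.any_cons, List.any_nil, Bool.or_false]
  exact pv_key _ _ _ _ _ _ _ _ _
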